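-- pv_equiv track=rewrite | github.com/shayan-azizi/TV-Show-Downloader | main.py | normalize_link
-- ===== SOURCE A (Python) =====
-- def normalize_link (link_tag : str) -> str:
--     link = "https://mobomovies.fun/"
--     append = False
--
--     for i in link_tag:
--         if append:
--             link += i
--
--         if i == "/":
--             append = True
--
--         if i == '"':
--             append = False
--
--     return link[:-1]
-- ===== SOURCE B (Python) =====
-- def normalize_link(link_tag):
--     # Delimiter-jumping with str.find over suffixes instead of a per-character flag.
--     parts = ["https://mobomovies.fun/"]
--     s = link_tag
--     while True:
--         i = s.find('/')
--         if i == -1: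
--             break
--         s = s[i + 1:]
--         j = s.find('"')
--         if j == -1:
--             parts.append(s)
--             break
--         parts.append(s[:j + 1])
--         s = s[j + 1:]
--     return "".join(parts)[:-1]
-- ===== Notes on version B (the rewrite author's own statement) =====
-- stated objective: idiomatic
-- what changed: Replaces the per-character append-flag state machine by delimiter jumping: repeatedly str.find the next slash and the next double-quote on the remaining suffix, slice whole segments out, and join the parts at the end instead of concatenating char by char.
import Mathlib
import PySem

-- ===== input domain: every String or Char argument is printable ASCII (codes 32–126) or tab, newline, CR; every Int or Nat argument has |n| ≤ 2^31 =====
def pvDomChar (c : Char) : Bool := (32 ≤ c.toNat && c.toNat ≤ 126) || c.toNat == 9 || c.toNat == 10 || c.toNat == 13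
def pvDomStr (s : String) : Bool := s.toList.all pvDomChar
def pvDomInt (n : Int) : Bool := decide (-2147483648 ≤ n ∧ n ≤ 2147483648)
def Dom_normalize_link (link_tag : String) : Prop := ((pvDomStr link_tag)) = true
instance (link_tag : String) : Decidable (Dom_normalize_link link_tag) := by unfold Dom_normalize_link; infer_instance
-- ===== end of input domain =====

-- B replaces A's per-character flag loop by str.find delimiter jumping over suffixes (idiomatic); same return value on all inputs.

-- ===== PORT A =====
-- A's loop body: append i when the flag is set, then update the flag on '/' and '"'.
def stepA (st : List Char × Bool) (i : Char) : List Char × Bool :=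
  let link := if st.2 then st.1 ++ [i] else st.1
  let ap := if i = '/' then true else st.2
  let ap := if i = '"' then false else ap
  (link, ap)

def normalize_link (link_tag : String) : String :=
  -- link[:-1] : drop the last character (empty stays empty) — exact for str[:-1]
  String.mk (link_tag.toList.foldl stepA ("https://mobomovies.fun/".toList, false)).1.dropLast

-- ===== PORT B =====
-- s.find(c) on the current suffix: first index or none (-1 in Python) — exact.
-- Source B's while-loop over the shrinking suffix s:
def loopB (s : List Char) : List Char :=
  match h : s.idxOf? '/' with
  | none => []
  | some i =>
    let u := s.drop (i + 1)
    match u.idxOf? '"' with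
    | none => u
    | some j => u.take (j + 1) ++ loopB (u.drop (j + 1))
termination_by s.length
decreasing_by
  have hs : s ≠ [] := by intro he; subst he; simp [List.idxOf?] at h
  have : 0 < s.length := List.length_pos_iff.mpr hs
  simp only [List.length_drop]
  omega

def normalize_link_alt (link_tag : String) : String :=
  String.mk (("https://mobomovies.fun/".toList ++ loopB link_tag.toList).dropLast)

-- ===== PRECONDITION & SPEC =====
def Spec_normalize_link (link_tag : String) (out : String) : Prop := out = normalize_link_alt link_tag
instance (link_tag : String) (out : String) : Decidable (Spec_normalize_link link_tag out) := by unfold Spec_normalize_link; infer_instance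

-- ===== CLAIM (what is proved, stated in full; the proofs are below) =====
def Claim_equal_normalize_link : Prop := ∀ (link_tag : String), Dom_normalize_link link_tag → Spec_normalize_link link_tag (normalize_link link_tag)

-- ===== LEMMAS AND PROOFS =====
-- Characterisation of A's state machine: the characters appended while the flag is off / on.
mutual
def offRun : List Char → List Char
  | [] => []
  | c :: t => if c = '/' then onRun t else offRun t
def onRun : List Char → List Char
  | [] => []
  | c :: t => c :: (if c = '"' then offRun t else onRun t)
end

theorem foldA_char (l : List Char) : ∀ (link : List Char),
    (l.foldl stepA (link, false)).1 = link ++ offRun l ∧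
    (l.foldl stepA (link, true)).1 = link ++ onRun l := by
  induction l with
  | nil => intro link; simp [offRun, onRun]
  | cons c t ih =>
    intro link
    have h1 := (ih link).1
    have h2 := (ih link).2
    have h3 := (ih (link ++ [c])).1
    have h4 := (ih (link ++ [c])).2
    by_cases hsl : c = '/' <;> by_cases hq : c = '"' <;>
      simp_all [List.foldl, stepA, offRun, onRun]

theorem idxOf?_cons (c a : Char) (t : List Char) :
    (a :: t).idxOf? c = if a = c then some 0 else (t.idxOf? c).map (· + 1) := by
  by_cases h : a = c <;> simp [List.idxOf?, List.findIdx?_cons, h]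

theorem offRun_idx (l : List Char) :
    offRun l = match l.idxOf? '/' with
      | none => []
      | some i => onRun (l.drop (i + 1)) := by
  induction l with
  | nil => simp [offRun, List.idxOf?]
  | cons c t ih =>
    rw [idxOf?_cons]
    by_cases h : c = '/'
    · simp [offRun, h]
    · simp only [offRun, h, if_false]
      rw [ih]
      cases t.idxOf? '/' <;> simp

theorem onRun_idx (l : List Char) :
    onRun l = match l.idxOf? '"' with
      | none => l
      | some j => l.take (j + 1) ++ offRun (l.drop (j + 1)) := by
  induction l with
  | nil => simp [onRun, List.idxOf?]
  | cons c t ih =>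
    rw [idxOf?_cons]
    by_cases h : c = '"'
    · simp [onRun, h]
    · simp only [onRun, h, if_false]
      rw [ih]
      cases t.idxOf? '"' <;> simp

theorem idxOf?_lt {c : Char} {l : List Char} {i : ℕ} (h : l.idxOf? c = some i) : i < l.length := by
  induction l generalizing i with
  | nil => simp [List.idxOf?] at h
  | cons a t ih =>
    rw [idxOf?_cons] at h
    split at h
    · simp_all; omega
    · cases ht : t.idxOf? c <;> rw [ht] at h <;> simp at h
      obtain ⟨rfl⟩ := h
      simpa using Nat.succ_lt_succ (ih ht)


theorem loopB_eq_offRun : ∀ (n : ℕ) (l : List Char), l.length ≤ n → loopB l = offRun l := by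
  intro n
  induction n with
  | zero =>
    intro l hl
    have : l = [] := List.eq_nil_of_length_eq_zero (Nat.le_zero.mp hl)
    subst this; rw [loopB]; rfl
  | succ n ih =>
    intro l hl
    rw [loopB, offRun_idx]
    cases hi : l.idxOf? '/' with
    | none => rfl
    | some i =>
      simp only
      rw [onRun_idx]
      cases hj : (l.drop (i + 1)).idxOf? '"' with
      | none => rfl
      | some j =>
        simp only
        rw [ih]
        have := idxOf?_lt hi
        simp only [List.length_drop]
        omega

-- ===== VERDICT (by name: the statement is the Claim_ definition above) =====
theorem normalize_link_spec : Claim_equal_normalize_link := by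
  intro link_tag _
  show _ = _
  unfold normalize_link normalize_link_alt
  rw [(foldA_char link_tag.toList _).1,
      loopB_eq_offRun link_tag.toList.length link_tag.toList (le_refl _)]
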